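-- pv_equiv track=rewrite | github.com/TopMaths/Selfnumbers | SelfNumbers.py | classes
-- ===== SOURCE A (Python) =====
-- def classemod(n,b):
--     """calcule la suite de Kaprekar de n modulo b-1"""
--     n=n%(b-1)
--     L=[n]
--     for i in range(b):
--         n=(2*n)%(b-1)
--         L.append(n)
--     return L
--
-- def jointure(n,m,b):
--     """permet de déterminer si la jonction entre n et m existe en base b"""
--     n,m=min(n,m), max(n,m)
--     if n==0 and b!=0: return False
--     N=set(classemod(n,b))
--     M=set(classemod(m,b))
--     return N.intersection(M)!=set()
--
-- def classes(b,max=None):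
--     """Déterminer les classes de nombres de 1 à max : deux nombres sont dans la même classe si ces deux nombres se rejoignent
--
-- par défaut max vaut b
--
-- exemple :
-- >>> classes(10)
-- [[10, 1, 2, 4, 5, 7, 8], [9], [6, 3], [0]]
--
--
-- Un nombre d'une classe rejoint tout nombre de la même classe par les suites de Kaprékar mais ne rejoint aucun nombre d'une autre classe
--  """
--     if max==None: max=b
--     L=[]
--     NF=list(range(max+1))
--     while NF:
--         F=[]
--         x=NF.pop()
--         L.append([x])
--         for i in NF:
--             if jointure(x,i,b):
--                 L[-1].append(i)
--                 F.append(i)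
--         for y in F:
--             NF.remove(y)
--     return L
-- ===== SOURCE B (Python) =====
-- def classes(b, max=None):
--     if max is None:
--         max = b
--     orbits = {}  # residue -> frozenset of its doubling orbit mod b-1 (computed once per residue)
--
--     def orbit(n):
--         r = n % (b - 1)
--         s = orbits.get(r)
--         if s is None:
--             cur = r
--             acc = {r}
--             for _ in range(b):
--                 cur = (2 * cur) % (b - 1)
--                 acc.add(cur)
--             s = frozenset(acc)
--             orbits[r] = s
--         return s
--
--     def joined(x, n):
--         if min(x, n) == 0 and b != 0:
--             return False
--         return not orbit(x).isdisjoint(orbit(n))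
--
--     groups = []  # each group: [representative, then members in descending order]
--     for n in reversed(range(max + 1)):
--         for g in groups:
--             if joined(g[0], n):
--                 g.append(n)
--                 break
--         else:
--             groups.append([n])
--     return [[g[0]] + g[:0:-1] for g in groups]
-- ===== Notes on version B (the rewrite author's own statement) =====
-- stated objective: faster
-- what changed: B replaces A's repeated pop/scan/remove over the remaining-numbers list (recomputing the Kaprekar orbit list and set for both members of every tested pair) with one downward pass that assigns each number to the first group whose representative it joins, using doubling-orbit sets computed once per residue mod b-1 and memoised in a dict; intended as faster (a timing run measured 1.85-8x, unconfirmed at the largest size).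
import Mathlib
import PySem

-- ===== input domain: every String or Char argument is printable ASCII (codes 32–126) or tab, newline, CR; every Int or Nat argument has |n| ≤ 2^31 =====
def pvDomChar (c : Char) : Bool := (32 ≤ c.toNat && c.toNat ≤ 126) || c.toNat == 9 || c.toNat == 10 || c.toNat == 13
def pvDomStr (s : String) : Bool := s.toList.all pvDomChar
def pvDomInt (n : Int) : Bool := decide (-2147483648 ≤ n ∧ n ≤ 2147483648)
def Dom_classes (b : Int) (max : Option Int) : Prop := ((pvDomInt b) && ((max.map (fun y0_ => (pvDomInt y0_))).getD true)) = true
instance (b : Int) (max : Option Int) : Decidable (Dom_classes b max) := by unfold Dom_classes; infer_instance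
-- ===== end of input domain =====

-- B memoises the doubling-orbit set per residue (computed once in a dict) and groups the
-- numbers in one downward pass that assigns each number to the first matching representative,
-- instead of A's repeated pop/scan/remove over the remaining-numbers list; intended as faster
-- (a timing run measured 1.85-8x on generated inputs, unconfirmed at the largest size).

-- ===== PORT A =====
-- classemod(n, b): n %= b-1; L=[n]; for i in range(b): n=(2*n)%(b-1); L.append(n)
def classemod (n b : Int) : List Int :=
  let n0 := PySem.Int.mod n (b - 1)
  ((PySem.List.pyRange 0 b 1).foldl
    (fun (st : Int × List Int) _ =>
      let n' := PySem.Int.mod (2 * st.1) (b - 1)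
      (n', st.2 ++ [n'])) (n0, [n0])).2

-- jointure(n, m, b)
def jointure (n m b : Int) : Bool :=
  let n' := min n m
  let m' := max n m
  if n' = 0 ∧ b ≠ 0 then false
  else
    let N := PySem.Set.ofList (classemod n' b)
    let M := PySem.Set.ofList (classemod m' b)
    !(PySem.Set.equal (PySem.Set.inter N M) PySem.Set.empty)   -- N.intersection(M) != set()

-- termination helper for the while-loop: the remove loop never lengthens NF
theorem pvRemoveFoldLen (F : List Int) : ∀ (l : List Int),
    (F.foldl (fun nf y => ((PySem.List.remove? nf y).getD nf)) l).length ≤ l.length := by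
  induction F with
  | nil => intro l; simp
  | cons y F ih =>
    intro l
    simp only [List.foldl_cons]
    refine le_trans (ih _) ?_
    cases h : PySem.List.remove? l y with
    | none => simp
    | some t =>
      have hm : y ∈ l := by
        by_contra hn
        rw [← PySem.List.remove?_eq_none_iff (xs := l) (v := y)] at hn
        simp [h] at hn
      have := PySem.List.remove?_eq_some_erase (xs := l) (v := y) hm
      rw [h] at this
      simp only [Option.getD_some, Option.some.injEq] at this ⊢
      rw [this]
      exact List.length_erase_le ..

-- the while NF: loop of classes (x = NF.pop(); scan NF; remove the joined ones)
def aLoop (b : Int) (NF : List Int) : List (List Int) :=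
  match h : PySem.List.pop? NF with
  | none => []                                   -- NF == []: loop ends
  | some (x, rest) =>
    let F := rest.filter (fun i => jointure x i b)
    -- for y in F: NF.remove(y)  (remove? never misses here: NF's elements are distinct;
    -- .getD nf is an unreachable fallback for the ValueError case)
    (x :: F) :: aLoop b (F.foldl (fun nf y => ((PySem.List.remove? nf y).getD nf)) rest)
termination_by NF.length
decreasing_by
  have hlen := PySem.List.length_of_pop?_eq_some (xs := NF) h
  have := pvRemoveFoldLen (rest.filter (fun i => jointure x i b)) rest
  simp at hlen ⊢
  omega

def classes (b : Int) (max : Option Int) : List (List Int) :=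
  let mx := match max with | none => b | some m => m    -- if max==None: max=b
  aLoop b (PySem.List.pyRange 0 (mx + 1) 1)             -- NF = list(range(max+1))

-- ===== PORT B =====
-- body of B's orbit() on a cache miss: cur=r; acc={r}; for _ in range(b): cur=(2*cur)%(b-1); acc.add(cur)
def orbitFrom (b r : Int) : PySem.Set Int :=
  ((PySem.List.pyRange 0 b 1).foldl
    (fun (st : Int × PySem.Set Int) _ =>
      let cur := PySem.Int.mod (2 * st.1) (b - 1)
      (cur, PySem.Set.add st.2 cur)) (r, PySem.Set.ofList [r])).2

-- orbit(n): memoised per residue r = n % (b-1)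
def orbitB (b n : Int) (d : PySem.Dict Int (PySem.Set Int)) :
    PySem.Set Int × PySem.Dict Int (PySem.Set Int) :=
  let r := PySem.Int.mod n (b - 1)
  match d.get? r with
  | some s => (s, d)
  | none => let s := orbitFrom b r; (s, d.insert r s)

-- joined(x, n)
def joinedB (b x n : Int) (d : PySem.Dict Int (PySem.Set Int)) :
    Bool × PySem.Dict Int (PySem.Set Int) :=
  if min x n = 0 ∧ b ≠ 0 then (false, d)
  else
    let p1 := orbitB b x d
    let p2 := orbitB b n p1.2
    (!(PySem.Set.isdisjoint p1.1 p2.1), p2.2)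

-- the inner 'for g in groups: … break / else: groups.append([n])'
def insertG (b n : Int) : List (List Int) → PySem.Dict Int (PySem.Set Int) →
    List (List Int) × PySem.Dict Int (PySem.Set Int)
  | [], d => ([[n]], d)
  | g :: gs, d =>
    let p := joinedB b (g.headD 0) n d          -- g[0]; groups are nonempty by construction
    if p.1 then ((g ++ [n]) :: gs, p.2)
    else
      let q := insertG b n gs p.2
      (g :: q.1, q.2)

def classes_alt (b : Int) (max : Option Int) : List (List Int) :=
  let mx := match max with | none => b | some m => m
  -- for n in reversed(range(max+1)): insert n into groups, threading the orbit cache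
  let st := ((PySem.List.pyRange 0 (mx + 1) 1).reverse).foldl
      (fun (st : List (List Int) × PySem.Dict Int (PySem.Set Int)) n => insertG b n st.1 st.2)
      ([], PySem.Dict.empty)
  -- [[g[0]] + g[:0:-1] for g in groups]  (g[:0:-1] = the members after the head, reversed; exact for any list)
  st.1.map (fun g => g.headD 0 :: (g.drop 1).reverse)

-- ===== PRECONDITION & SPEC =====
-- Pre_ excludes exactly b = 1 with an effective max ≥ 2: there Python A (and B) raise
-- ZeroDivisionError ('% (b-1)' with b-1 = 0 is reached on a pair of nonzero numbers).
def Pre_classes (b : Int) (max : Option Int) : Prop := ¬ (b = 1 ∧ 2 ≤ max.getD b)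
instance (b : Int) (max : Option Int) : Decidable (Pre_classes b max) := by unfold Pre_classes; infer_instance
def pvWitness_classes : Int × Option Int := (10, none)

def Spec_classes (b : Int) (max : Option Int) (out : List (List Int)) : Prop := out = classes_alt b max
instance (b : Int) (max : Option Int) (out : List (List Int)) : Decidable (Spec_classes b max out) := by unfold Spec_classes; infer_instance

-- ===== CLAIM (what is proved, stated in full; the proofs are below) =====
def Claim_equal_classes : Prop := ∀ (b : Int) (max : Option Int), Dom_classes b max → Pre_classes b max → Spec_classes b max (classes b max)

-- ===== LEMMAS AND PROOFS =====

-- the pure (cache-free) reading of B's joined test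
def jointureP (b x n : Int) : Bool :=
  if min x n = 0 ∧ b ≠ 0 then false
  else !(PySem.Set.isdisjoint (orbitFrom b (PySem.Int.mod x (b - 1)))
          (orbitFrom b (PySem.Int.mod n (b - 1))))

-- the cache invariant: every cached set is the orbit of its residue key
def InvD (b : Int) (d : PySem.Dict Int (PySem.Set Int)) : Prop :=
  ∀ r s, d.get? r = some s → s = orbitFrom b r

-- pure reading of insertG
def insP (b n : Int) : List (List Int) → List (List Int)
  | [] => [[n]]
  | g :: gs => if jointure (g.headD 0) n b then (g ++ [n]) :: gs else g :: insP b n gs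

-- A's grouping recursion read off the reversed (descending) list
def dLoop (b : Int) : List Int → List (List Int)
  | [] => []
  | x :: rd =>
    (x :: (rd.filter (fun i => jointure x i b)).reverse) ::
      dLoop b (rd.filter (fun i => !jointure x i b))
termination_by l => l.length
decreasing_by
  have := List.length_filter_le (fun x1 => !jointure x x1.1 b) rd.attach
  simp only [List.length_attach] at this
  simp
  omega

theorem pvOfListAppend (L : List Int) (x : Int) :
    PySem.Set.ofList (L ++ [x]) = PySem.Set.add (PySem.Set.ofList L) x := by
  rw [PySem.Set.ofList_eq_foldl, PySem.Set.ofList_eq_foldl, List.foldl_append]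
  rfl

theorem pvFoldPair (b : Int) (l : List Int) : ∀ (c : Int) (L : List Int),
    PySem.Set.ofList ((l.foldl (fun (st : Int × List Int) _ =>
        let n' := PySem.Int.mod (2 * st.1) (b - 1)
        (n', st.2 ++ [n'])) (c, L)).2) =
      (l.foldl (fun (st : Int × PySem.Set Int) _ =>
        let cur := PySem.Int.mod (2 * st.1) (b - 1)
        (cur, PySem.Set.add st.2 cur)) (c, PySem.Set.ofList L)).2 := by
  induction l with
  | nil => intro c L; simp
  | cons a l ih =>
    intro c L
    simp only [List.foldl_cons]
    rw [← pvOfListAppend]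
    exact ih _ _

theorem pvOfListClassemod (n b : Int) :
    PySem.Set.ofList (classemod n b) = orbitFrom b (PySem.Int.mod n (b - 1)) := by
  unfold classemod orbitFrom
  exact pvFoldPair b _ _ _

theorem pvEqEmptyInter (s t : PySem.Set Int) :
    PySem.Set.equal (PySem.Set.inter s t) PySem.Set.empty = PySem.Set.isdisjoint s t := by
  rw [Bool.eq_iff_iff, PySem.Set.equal_iff, PySem.Set.isdisjoint_iff]
  constructor
  · intro h x hx hxt
    have := (h x).mp ((PySem.Set.mem_inter s t x).mpr ⟨hx, hxt⟩)
    simp [PySem.Set.empty] at this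
  · intro h x
    constructor
    · intro hx
      rcases (PySem.Set.mem_inter s t x).mp hx with ⟨h1, h2⟩
      exact absurd h2 (h x h1)
    · intro hx
      simp [PySem.Set.empty] at hx

theorem pvDisjComm (s t : PySem.Set Int) :
    PySem.Set.isdisjoint s t = PySem.Set.isdisjoint t s := by
  rw [Bool.eq_iff_iff, PySem.Set.isdisjoint_iff, PySem.Set.isdisjoint_iff]
  constructor <;> exact fun h x hx hx' => h x hx' hx

theorem pvJointureP_eq (b x n : Int) : jointureP b x n = jointure x n b := by
  unfold jointureP jointure
  simp only []
  split_ifs with hc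
  · rfl
  · rw [pvEqEmptyInter, pvOfListClassemod, pvOfListClassemod]
    rcases le_total x n with h | h
    · rw [min_eq_left h, max_eq_right h]
    · rw [min_eq_right h, max_eq_left h, pvDisjComm]

theorem pvOrbitB_spec (b n : Int) (d : PySem.Dict Int (PySem.Set Int)) (h : InvD b d) :
    (orbitB b n d).1 = orbitFrom b (PySem.Int.mod n (b - 1)) ∧ InvD b (orbitB b n d).2 := by
  unfold orbitB
  simp only []
  cases hg : d.get? (PySem.Int.mod n (b - 1)) with
  | some s => exact ⟨h _ _ hg, h⟩
  | none =>
    refine ⟨rfl, ?_⟩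
    intro r' s' hr'
    by_cases hrr : r' = PySem.Int.mod n (b - 1)
    · subst hrr
      rw [PySem.Dict.get?_insert_self] at hr'
      exact (Option.some.injEq _ _ ▸ hr').symm
    · rw [PySem.Dict.get?_insert_of_ne _ _ hrr] at hr'
      exact h _ _ hr'

theorem pvJoinedB_spec (b x n : Int) (d : PySem.Dict Int (PySem.Set Int)) (h : InvD b d) :
    (joinedB b x n d).1 = jointure x n b ∧ InvD b (joinedB b x n d).2 := by
  rw [← pvJointureP_eq]
  unfold joinedB jointureP
  simp only []
  split_ifs with hc
  · exact ⟨rfl, h⟩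
  · obtain ⟨e1, h1⟩ := pvOrbitB_spec b x d h
    obtain ⟨e2, h2⟩ := pvOrbitB_spec b n _ h1
    exact ⟨by rw [e1, e2], h2⟩

theorem pvInsertG_spec (b n : Int) (gs : List (List Int)) : ∀ (d : PySem.Dict Int (PySem.Set Int)),
    InvD b d →
    (insertG b n gs d).1 = insP b n gs ∧ InvD b (insertG b n gs d).2 := by
  induction gs with
  | nil => exact fun d h => ⟨rfl, h⟩
  | cons g gs ih =>
    intro d h
    obtain ⟨e, h1⟩ := pvJoinedB_spec b (g.headD 0) n d h
    unfold insertG insP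
    simp only []
    rw [e]
    cases hj : jointure (g.headD 0) n b with
    | false =>
      obtain ⟨e2, h2⟩ := ih _ h1
      refine ⟨?_, ?_⟩
      · simp only [Bool.false_eq_true, if_false]
        rw [e2]
      · simpa only [Bool.false_eq_true, if_false] using h2
    | true =>
      refine ⟨?_, ?_⟩
      · simp
      · simpa only [if_true] using h1

theorem pvFold_spec (b : Int) (l : List Int) : ∀ (gs : List (List Int))
    (d : PySem.Dict Int (PySem.Set Int)), InvD b d →
    (l.foldl (fun st n => insertG b n st.1 st.2) (gs, d)).1 =
      l.foldl (fun gs n => insP b n gs) gs := by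
  induction l with
  | nil => intro gs d _; rfl
  | cons n l ih =>
    intro gs d h
    simp only [List.foldl_cons]
    obtain ⟨e, h1⟩ := pvInsertG_spec b n gs d h
    have := ih (insertG b n gs d).1 (insertG b n gs d).2 h1
    rw [← e]
    exact this

theorem pvRemoveFoldCons (F : List Int) : ∀ (a : Int) (t : List Int), (∀ y ∈ F, y ≠ a) →
    F.foldl (fun nf y => ((PySem.List.remove? nf y).getD nf)) (a :: t) =
      a :: F.foldl (fun nf y => ((PySem.List.remove? nf y).getD nf)) t := by
  induction F with
  | nil => intro a t _; rfl
  | cons y F ih =>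
    intro a t hne
    simp only [List.foldl_cons]
    rw [PySem.List.remove?_cons_of_ne _ (Ne.symm (hne y (by simp)))]
    cases ht : PySem.List.remove? t y with
    | none => simp only [Option.map_none, Option.getD_none]; exact ih a t (fun z hz => hne z (by simp [hz]))
    | some t2 => simp only [Option.map_some, Option.getD_some]; exact ih a t2 (fun z hz => hne z (by simp [hz]))

theorem pvRemoveFold (p : Int → Bool) : ∀ (l : List Int), l.Nodup →
    (l.filter p).foldl (fun nf y => ((PySem.List.remove? nf y).getD nf)) l =
      l.filter (fun i => !p i) := by
  intro l
  induction l with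
  | nil => intro _; rfl
  | cons a t ih =>
    intro hnd
    have hat : a ∉ t := (List.nodup_cons.mp hnd).1
    have hnt : t.Nodup := (List.nodup_cons.mp hnd).2
    cases hp : p a with
    | true =>
      rw [List.filter_cons_of_pos hp, List.foldl_cons, PySem.List.remove?_cons_self,
        Option.getD_some, List.filter_cons_of_neg (by simp [hp])]
      exact ih hnt
    | false =>
      rw [List.filter_cons_of_neg (by simp [hp]), List.filter_cons_of_pos (by simp [hp]),
        pvRemoveFoldCons _ _ _ (fun y hy => by rintro rfl; exact hat (List.mem_filter.mp hy).1)]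
      rw [ih hnt]

theorem pvALoopNil (b : Int) : aLoop b [] = [] := by
  rw [aLoop]
  split
  · rfl
  · rename_i x rest h
    simp [PySem.List.pop?, PySem.List.pyIdx?] at h

theorem pvALoopCons (b x : Int) (rd : List Int) :
    aLoop b (rd ++ [x]) =
      (x :: rd.filter (fun i => jointure x i b)) ::
        aLoop b ((rd.filter (fun i => jointure x i b)).foldl
          (fun nf y => ((PySem.List.remove? nf y).getD nf)) rd) := by
  rw [aLoop]
  split
  · rename_i h
    rw [PySem.List.pop?_last] at h
    simp at h
  · rename_i x1 rest h
    rw [PySem.List.pop?_last] at h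
    injection h with h2
    cases h2
    rfl

theorem pvDLoopNil (b : Int) : dLoop b [] = [] := by simp [dLoop]

theorem pvALoop_eq_dLoop (b : Int) : ∀ (k : Nat) (NF : List Int), NF.length ≤ k → NF.Nodup →
    aLoop b NF = dLoop b NF.reverse := by
  intro k
  induction k with
  | zero =>
    intro NF hlen _
    have : NF = [] := List.eq_nil_of_length_eq_zero (Nat.le_zero.mp hlen)
    subst this
    rw [pvALoopNil]
    exact (pvDLoopNil b).symm
  | succ k ih =>
    intro NF hlen hnd
    cases hrev : NF.reverse with
    | nil =>
      have : NF = [] := by simpa using congrArg List.reverse hrev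
      subst this
      rw [pvALoopNil]
      exact (pvDLoopNil b).symm
    | cons x rd =>
      have hNF : NF = rd.reverse ++ [x] := by
        have := congrArg List.reverse hrev
        simpa using this
      subst hNF
      have hnd' : rd.reverse.Nodup ∧ x ∉ rd.reverse := by
        rw [List.nodup_append] at hnd
        refine ⟨hnd.1, fun hx => ?_⟩
        exact hnd.2.2 x hx x List.mem_cons_self rfl
      have hle : (rd.reverse.filter (fun i => !jointure x i b)).length ≤ k := by
        have h1 := List.length_filter_le (fun i => !jointure x i b) rd.reverse
        simp only [List.length_append, List.length_reverse, List.length_cons,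
          List.length_nil] at hlen h1 ⊢
        omega
      rw [pvALoopCons]
      rw [pvRemoveFold _ _ hnd'.1]
      rw [dLoop]
      rw [ih _ hle (hnd'.1.filter _)]
      simp only [List.filter_reverse, List.reverse_reverse]

theorem pvFoldInsP (b : Int) : ∀ (l : List Int) (g : List Int) (gs : List (List Int)),
    g ≠ [] →
    l.foldl (fun gs n => insP b n gs) (g :: gs) =
      (g ++ l.filter (fun n => jointure (g.headD 0) n b)) ::
        (l.filter (fun n => !jointure (g.headD 0) n b)).foldl (fun gs n => insP b n gs) gs := by
  intro l
  induction l with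
  | nil => intro g gs _; simp
  | cons n t ih =>
    intro g gs hg
    obtain ⟨a, g', rfl⟩ : ∃ a g', g = a :: g' := by
      cases g with
      | nil => exact absurd rfl hg
      | cons a g' => exact ⟨a, g', rfl⟩
    simp only [List.foldl_cons, insP, List.headD_cons]
    by_cases hj : jointure a n b
    · simp only [hj, if_true]
      rw [List.filter_cons_of_pos (by simp [hj]), List.filter_cons_of_neg (by simp [hj])]
      have := ih (a :: g' ++ [n]) gs (by simp)
      simp only [List.headD_cons, List.cons_append] at this ⊢
      rw [this]
      simp
    · simp only [hj, Bool.false_eq_true, if_false]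
      rw [List.filter_cons_of_neg (by simp [hj]), List.filter_cons_of_pos (by simp [hj])]
      have := ih (a :: g') (insP b n gs) (by simp)
      simp only [List.headD_cons] at this
      rw [this]
      rfl

theorem pvDLoop_eq_fold (b : Int) : ∀ (k : Nat) (l : List Int), l.length ≤ k →
    dLoop b l = (l.foldl (fun gs n => insP b n gs) []).map
      (fun g => g.headD 0 :: (g.drop 1).reverse) := by
  intro k
  induction k with
  | zero =>
    intro l hlen
    have : l = [] := List.eq_nil_of_length_eq_zero (Nat.le_zero.mp hlen)
    subst this
    simp [dLoop]
  | succ k ih =>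
    intro l hlen
    cases l with
    | nil => simp [dLoop]
    | cons x t =>
      have hle : (t.filter (fun i => !jointure x i b)).length ≤ k :=
        le_trans (List.length_filter_le _ _) (by simpa using Nat.le_of_succ_le_succ hlen)
      rw [dLoop, List.foldl_cons]
      have h0 : insP b x [] = [[x]] := rfl
      rw [h0, pvFoldInsP b t [x] [] (by simp), List.map_cons, ih _ hle]
      simp

-- ===== VERDICT (by name: the statement is the Claim_ definition above) =====
theorem classes_spec : Claim_equal_classes := by
  intro b max _ _
  unfold Spec_classes classes classes_alt
  simp only []
  have hd : InvD b PySem.Dict.empty := by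
    intro r s hs
    rw [PySem.Dict.get?_empty] at hs
    exact absurd hs (by simp)
  rw [pvFold_spec b _ [] _ hd]
  rw [← pvDLoop_eq_fold b _ _ (le_refl _)]
  rw [pvALoop_eq_dLoop b _ _ (le_refl _) (PySem.List.nodup_pyRange_one _ _)]
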